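-- pv_equiv track=rewrite | github.com/TenderAnn/Care | intent_engine/api/utils_norm.py | _match_from_section
-- ===== SOURCE A (Python) =====
-- from typing import Dict, Iterable, List, Mapping, Optional, Pattern, Tuple
--
-- def _match_from_section(text: str, section: Mapping[str, Iterable[str]]) -> Optional[str]:
--     if not section:
--         return None
--     candidates: List[Tuple[int, str]] = []
--     lowered = text.lower()
--     for canonical, aliases in section.items():
--         variants = [canonical]
--         if aliases:
--             variants.extend(aliases)
--         for alias in variants:
--             alias_norm = alias.strip()
--             if not alias_norm:
--                 continue
--             if alias_norm.lower() in lowered: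
--                 candidates.append((len(alias_norm), canonical))
--                 break
--     if not candidates:
--         return None
--     candidates.sort(reverse=True)
--     return candidates[0][1]
-- ===== SOURCE B (Python) =====
-- def _match_from_section(text, section):
--     if not section:
--         return None
--     lowered = text.lower()
--     best = None
--     for canonical, aliases in section.items():
--         for alias in (canonical, *(aliases or ())):
--             alias_norm = alias.strip()
--             if not alias_norm:
--                 continue
--             if alias_norm.lower() in lowered:
--                 cand = (len(alias_norm), canonical)
--                 if best is None or cand > best:
--                     best = cand
--                 break
--     return None if best is None else best[1]
-- ===== Notes on version B (the rewrite author's own statement) =====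
-- stated objective: simpler
-- what changed: Replaced the candidates list, the reverse sort and the candidates[0][1] lookup by a single running maximum (a (length, canonical) tuple compared with strict >) updated inside the same outer loop, so no intermediate list is built and no sort is needed.
import Mathlib
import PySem

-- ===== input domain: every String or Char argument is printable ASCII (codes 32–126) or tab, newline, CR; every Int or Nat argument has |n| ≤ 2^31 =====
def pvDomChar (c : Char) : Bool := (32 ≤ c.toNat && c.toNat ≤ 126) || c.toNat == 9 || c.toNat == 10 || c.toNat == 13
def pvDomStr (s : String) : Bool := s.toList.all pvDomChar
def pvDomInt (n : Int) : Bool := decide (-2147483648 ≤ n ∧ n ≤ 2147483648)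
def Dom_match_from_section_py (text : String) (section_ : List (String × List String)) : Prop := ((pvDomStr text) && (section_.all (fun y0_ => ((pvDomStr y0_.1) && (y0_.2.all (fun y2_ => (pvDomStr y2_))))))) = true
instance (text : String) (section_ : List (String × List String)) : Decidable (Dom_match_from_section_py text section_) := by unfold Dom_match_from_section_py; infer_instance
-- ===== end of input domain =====

-- B replaces A's candidates list + reverse sort + candidates[0][1] by a running maximum
-- ((length, canonical) tuple, strict >) kept inside the same outer loop: simpler, no intermediate list, no sort.

-- ===== PORT A =====
-- inner 'for alias in variants' loop of A: first alias whose strip is non-empty and whose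
-- lowered strip occurs in 'lowered'; returns len(alias_norm) of that alias
def pvFindAliasA (lowered : List Char) : List String → Option Nat
  | [] => none
  | alias_ :: rest =>
    let aliasNorm := PySem.Chars.strip alias_.toList
    if aliasNorm = [] then pvFindAliasA lowered rest
    else if PySem.Chars.isIn (PySem.Chars.lower aliasNorm) lowered then some aliasNorm.length
    else pvFindAliasA lowered rest

def match_from_section_py (text : String) (section_ : List (String × List String)) : Option String :=
  if section_.isEmpty then none else
  let lowered := PySem.Chars.lower text.toList
  let candidates : List (Nat × String) := section_.foldl (fun cs item =>
    let variants := if item.2.isEmpty then [item.1] else item.1 :: item.2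
    match pvFindAliasA lowered variants with
    | some n => cs ++ [(n, item.1)]
    | none => cs) []
  if candidates.isEmpty then none
  else some (((PySem.List.sorted2 candidates Prod.fst Prod.snd true).headD (0, "")).2)

-- ===== PORT B =====
-- same inner loop, transliterated for B
def pvFindAliasB (lowered : List Char) : List String → Option Nat
  | [] => none
  | alias_ :: rest =>
    let aliasNorm := PySem.Chars.strip alias_.toList
    if aliasNorm = [] then pvFindAliasB lowered rest
    else if PySem.Chars.isIn (PySem.Chars.lower aliasNorm) lowered then some aliasNorm.length
    else pvFindAliasB lowered rest

-- Python's tuple comparison 'cand > best' on (int, str)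
def pvCandGt (c b : Nat × String) : Bool :=
  decide (b.1 < c.1 ∨ (b.1 = c.1 ∧ b.2 < c.2))

def match_from_section_py_alt (text : String) (section_ : List (String × List String)) : Option String :=
  if section_.isEmpty then none else
  let lowered := PySem.Chars.lower text.toList
  let best : Option (Nat × String) := section_.foldl (fun b item =>
    match pvFindAliasB lowered (item.1 :: item.2) with
    | none => b
    | some n =>
      match b with
      | none => some (n, item.1)
      | some bb => if pvCandGt (n, item.1) bb then some (n, item.1) else some bb) none
  match best with
  | none => none
  | some bb => some bb.2

-- ===== PRECONDITION & SPEC =====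
def Spec_match_from_section_py (text : String) (section_ : List (String × List String)) (out : Option String) : Prop := out = match_from_section_py_alt text section_
instance (text : String) (section_ : List (String × List String)) (out : Option String) : Decidable (Spec_match_from_section_py text section_ out) := by unfold Spec_match_from_section_py; infer_instance

-- ===== CLAIM (what is proved, stated in full; the proofs are below) =====
def Claim_equal_match_from_section_py : Prop := ∀ (text : String) (section_ : List (String × List String)), Dom_match_from_section_py text section_ → Spec_match_from_section_py text section_ (match_from_section_py text section_)

-- ===== LEMMAS AND PROOFS =====

-- B's running-max step, as a function of the candidate stream
def pvOptStep (b : Option (Nat × String)) (c : Nat × String) : Option (Nat × String) :=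
  match b with
  | none => some c
  | some bb => if pvCandGt c bb then some c else some bb

theorem pvFindAlias_eq (lowered : List Char) (vs : List String) :
    pvFindAliasA lowered vs = pvFindAliasB lowered vs := by
  induction vs with
  | nil => rfl
  | cons a rest ih => simp [pvFindAliasA, pvFindAliasB, ih]

theorem pvVariants_eq (x : String) (l : List String) :
    (if l.isEmpty then [x] else x :: l) = x :: l := by
  cases l <;> simp

-- sorted2's internal descending test equals Python's tuple '>'
theorem pvBefore_eq (x y : Nat × String) :
    (decide (y.1 < x.1) || (!decide (x.1 < y.1) && decide (y.2 < x.2))) =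
      pvCandGt x y := by
  simp only [pvCandGt]
  rcases lt_trichotomy x.1 y.1 with h | h | h
  · simp [h, lt_asymm h, Ne.symm (ne_of_lt h)]
  · simp [h]
  · simp [h, lt_asymm h]

theorem pvHead_insertBy (p : (Nat × String) → (Nat × String) → Bool)
    (x : Nat × String) (acc : List (Nat × String)) :
    (PySem.List.insertBy p x acc).head? =
      (match acc.head? with
        | none => some x
        | some y => if p x y then some x else some y) := by
  cases acc with
  | nil => rfl
  | cons y ys => by_cases h : p x y <;> simp [PySem.List.insertBy, h]

theorem pvHead_foldl_insertBy (p : (Nat × String) → (Nat × String) → Bool)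
    (cs : List (Nat × String)) (acc : List (Nat × String)) :
    (cs.foldl (fun a x => PySem.List.insertBy p x a) acc).head? =
      cs.foldl (fun b x =>
        match b with
        | none => some x
        | some y => if p x y then some x else some y) acc.head? := by
  induction cs generalizing acc with
  | nil => rfl
  | cons c cs ih =>
    simp only [List.foldl_cons]
    rw [ih, pvHead_insertBy]

theorem pvInsertBy_congr (p q : (Nat × String) → (Nat × String) → Bool)
    (hp : ∀ x y, p x y = q x y) (x : Nat × String) (acc : List (Nat × String)) :
    PySem.List.insertBy p x acc = PySem.List.insertBy q x acc := by
  induction acc with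
  | nil => rfl
  | cons y ys ih => simp [PySem.List.insertBy, hp, ih]

-- head of the reverse-sorted candidates is the running maximum
theorem pvSorted_head (cs : List (Nat × String)) :
    (PySem.List.sorted2 cs Prod.fst Prod.snd true).head? = cs.foldl pvOptStep none := by
  have h0 : PySem.List.sorted2 cs Prod.fst Prod.snd true =
      cs.foldl (fun a x => PySem.List.insertBy
        (fun a b : Nat × String =>
          decide (b.1 < a.1) || (!decide (a.1 < b.1) && decide (b.2 < a.2))) x a) [] := rfl
  have h1 : PySem.List.sorted2 cs Prod.fst Prod.snd true =
      cs.foldl (fun a x => PySem.List.insertBy (fun a b => pvCandGt a b) x a) [] := by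
    rw [h0]
    exact List.foldl_ext _ _ _ (fun a x _ =>
      pvInsertBy_congr _ _ (fun u v => pvBefore_eq u v) x a)
  rw [h1, pvHead_foldl_insertBy]
  rfl

-- B's fold over the section equals the running maximum of the candidate stream
theorem pvFold_eq (lowered : List Char) (sec : List (String × List String))
    (cs : List (Nat × String)) :
    sec.foldl (fun b item =>
        match pvFindAliasB lowered (item.1 :: item.2) with
        | none => b
        | some n =>
          match b with
          | none => some (n, item.1)
          | some bb => if pvCandGt (n, item.1) bb then some (n, item.1) else some bb)
      (cs.foldl pvOptStep none) =
      (sec.foldl (fun cs item =>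
        match pvFindAliasB lowered (item.1 :: item.2) with
        | some n => cs ++ [(n, item.1)]
        | none => cs) cs).foldl pvOptStep none := by
  induction sec generalizing cs with
  | nil => rfl
  | cons item rest ih =>
    simp only [List.foldl_cons]
    cases hf : pvFindAliasB lowered (item.1 :: item.2) with
    | none => dsimp only; exact ih cs
    | some n =>
      dsimp only
      have h2 : (cs ++ [(n, item.1)]).foldl pvOptStep none =
          pvOptStep (cs.foldl pvOptStep none) (n, item.1) := by
        simp [List.foldl_append]
      rw [show (match cs.foldl pvOptStep none with
          | none => some (n, item.1)
          | some bb => if pvCandGt (n, item.1) bb then some (n, item.1) else some bb) =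
          pvOptStep (cs.foldl pvOptStep none) (n, item.1) from rfl, ← h2]
      exact ih (cs ++ [(n, item.1)])

-- A's candidates fold, with the inner loop rewritten to B's helper and variants flattened
theorem pvCandFold_eq (lowered : List Char) (sec : List (String × List String))
    (cs : List (Nat × String)) :
    sec.foldl (fun cs item =>
        let variants := if item.2.isEmpty then [item.1] else item.1 :: item.2
        match pvFindAliasA lowered variants with
        | some n => cs ++ [(n, item.1)]
        | none => cs) cs =
      sec.foldl (fun cs item =>
        match pvFindAliasB lowered (item.1 :: item.2) with
        | some n => cs ++ [(n, item.1)]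
        | none => cs) cs := by
  simp only [pvVariants_eq, pvFindAlias_eq]

-- A's tail (guard + reverse sort + [0][1]) equals B's tail (unpack the running maximum)
theorem pvFinish (cs : List (Nat × String)) :
    (if cs.isEmpty then (none : Option String)
      else some (((PySem.List.sorted2 cs Prod.fst Prod.snd true).headD (0, "")).2)) =
      (match cs.foldl pvOptStep none with
        | none => none
        | some bb => some bb.2) := by
  cases hc : cs with
  | nil => rfl
  | cons c cs' =>
    have hlen : (PySem.List.sorted2 (c :: cs') Prod.fst Prod.snd true).length =
        (c :: cs').length := (PySem.List.sorted2_perm _ _ _ _).length_eq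
    have hsome : ((c :: cs').foldl pvOptStep none).isSome := by
      rw [← pvSorted_head]
      cases hs : PySem.List.sorted2 (c :: cs') Prod.fst Prod.snd true with
      | nil => rw [hs] at hlen; simp at hlen
      | cons h t => simp
    obtain ⟨m, hm⟩ := Option.isSome_iff_exists.mp hsome
    have hhead : (PySem.List.sorted2 (c :: cs') Prod.fst Prod.snd true).head? = some m := by
      rw [pvSorted_head, hm]
    have hD : (PySem.List.sorted2 (c :: cs') Prod.fst Prod.snd true).headD (0, "") = m := by
      cases hs : PySem.List.sorted2 (c :: cs') Prod.fst Prod.snd true with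
      | nil => rw [hs] at hhead; simp at hhead
      | cons h t => rw [hs] at hhead; simp at hhead; simp [hhead]
    rw [hm, hD]
    rfl

-- ===== VERDICT (by name: the statement is the Claim_ definition above) =====
theorem match_from_section_py_spec : Claim_equal_match_from_section_py := by
  intro text section_ _
  unfold Spec_match_from_section_py match_from_section_py match_from_section_py_alt
  by_cases hsec : section_.isEmpty
  · simp [hsec]
  · simp only [hsec]
    have hbest := pvFold_eq (PySem.Chars.lower text.toList) section_ []
    simp only [List.foldl_nil] at hbest
    rw [hbest, pvCandFold_eq]
    exact pvFinish _
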